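-- pv_equiv track=rewrite | github.com/luisdavid64/MRI-Implicit-Neural-Representations | src/undersampling/utils.py | get_square_ordered_idxs
-- ===== SOURCE A (Python) =====
-- from typing import Tuple
--
-- def get_square_ordered_idxs(square_side_size: int, square_id: int) -> Tuple[Tuple, ...]:
--     """Returns ordered (clockwise) indices of a sub-square of a square matrix.
--
--     Parameters
--     ----------
--     square_side_size: int
--         Square side size. Dim of array.
--     square_id: int
--         Number of sub-square. Can be 0, ..., square_side_size // 2.
--
--     Returns
--     -------
--     ordered_idxs: List of tuples.
--         Indices of each point that belongs to the square_id-th sub-square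
--         starting from top-left point clockwise.
--     """
--     assert square_id in range(square_side_size // 2)
--
--     ordered_idxs = list()
--
--     for col in range(square_id, square_side_size - square_id):
--         ordered_idxs.append((square_id, col))
--
--     for row in range(square_id + 1, square_side_size - (square_id + 1)):
--         ordered_idxs.append((row, square_side_size - (square_id + 1)))
--
--     for col in range(square_side_size - (square_id + 1), square_id, -1):
--         ordered_idxs.append((square_side_size - (square_id + 1), col))
--
--     for row in range(square_side_size - (square_id + 1), square_id, -1):
--         ordered_idxs.append((row, square_id))
--
--     return tuple(ordered_idxs)
-- ===== SOURCE B (Python) =====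
-- def get_square_ordered_idxs(square_side_size: int, square_id: int):
--     """Turtle walk: keep a current (row, col) and a direction; emit the cell,
--     then step, turning clockwise whenever the next step would leave the ring's
--     bounding box. Stops after exactly 4*(hi-lo) cells."""
--     assert square_id in range(square_side_size // 2)
--     lo = square_id
--     hi = square_side_size - square_id - 1
--     dirs = [(0, 1), (1, 0), (0, -1), (-1, 0)]
--     r = c = lo
--     d = 0
--     out = []
--     append = out.append
--     for _ in range(4 * (hi - lo)):
--         append((r, c))
--         dr, dc = dirs[d]
--         nr = r + dr
--         nc = c + dc
--         if nr < lo or nr > hi or nc < lo or nc > hi: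
--             d = (d + 1) % 4
--             dr, dc = dirs[d]
--             nr = r + dr
--             nc = c + dc
--         r = nr
--         c = nc
--     return tuple(out)
-- ===== Notes on version B (the rewrite author's own statement) =====
-- stated objective: alternative
-- what changed: Replaces A's four precomputed edge loops by a stateful turtle walk: one loop keeps a current (row, col) and a direction, turning clockwise whenever the next step would leave the ring's bounding box, for exactly 4*(hi-lo) steps.
import Mathlib
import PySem

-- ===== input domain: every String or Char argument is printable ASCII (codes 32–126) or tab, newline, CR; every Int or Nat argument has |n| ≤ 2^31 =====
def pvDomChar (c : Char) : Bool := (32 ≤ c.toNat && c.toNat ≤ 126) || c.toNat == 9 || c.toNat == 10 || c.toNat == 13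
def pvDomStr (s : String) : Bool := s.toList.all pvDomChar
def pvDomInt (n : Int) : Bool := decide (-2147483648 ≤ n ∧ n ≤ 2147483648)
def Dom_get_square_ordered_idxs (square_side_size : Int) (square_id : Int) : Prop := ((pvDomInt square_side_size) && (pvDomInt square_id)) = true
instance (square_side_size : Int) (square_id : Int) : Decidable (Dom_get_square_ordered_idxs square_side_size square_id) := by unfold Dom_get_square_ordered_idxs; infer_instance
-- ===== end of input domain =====

-- B replaces A's four precomputed edge loops by a stateful turtle walk (current cell +
-- direction, turning clockwise at the ring's bounding box) — alternative, same cost.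


-- ===== PORT A =====
-- literal transliteration of A's four append loops
def get_square_ordered_idxs (square_side_size : Int) (square_id : Int) : List (Int × Int) :=
  let o1 := (PySem.List.pyRange square_id (square_side_size - square_id) 1).foldl
    (fun acc col => acc ++ [(square_id, col)]) []
  let o2 := (PySem.List.pyRange (square_id + 1) (square_side_size - (square_id + 1)) 1).foldl
    (fun acc row => acc ++ [(row, square_side_size - (square_id + 1))]) o1
  let o3 := (PySem.List.pyRange (square_side_size - (square_id + 1)) square_id (-1)).foldl
    (fun acc col => acc ++ [(square_side_size - (square_id + 1), col)]) o2
  (PySem.List.pyRange (square_side_size - (square_id + 1)) square_id (-1)).foldl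
    (fun acc row => acc ++ [(row, square_id)]) o3

-- ===== PORT B =====
-- Source B's dirs table [(0,1),(1,0),(0,-1),(-1,0)], as the lookup d ↦ dirs[d] (d is always 0..3)
def pvDir (d : Int) : Int × Int :=
  if d = 0 then (0, 1) else if d = 1 then (1, 0) else if d = 2 then (0, -1) else (-1, 0)

-- Source B's `for _ in range(total)` loop: fuel-counted recursion over the same state (r, c, d, out)
def pvWalk (lo hi : Int) : Nat → Int → Int → Int → List (Int × Int) → List (Int × Int)
  | 0, _, _, _, out => out
  | Nat.succ n, r, c, d, out =>
    let out' := out ++ [(r, c)]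
    let dd := pvDir d
    let nr := r + dd.1
    let nc := c + dd.2
    if lo ≤ nr ∧ nr ≤ hi ∧ lo ≤ nc ∧ nc ≤ hi then
      pvWalk lo hi n nr nc d out'
    else
      let d' := PySem.Int.mod (d + 1) 4
      let dd' := pvDir d'
      pvWalk lo hi n (r + dd'.1) (c + dd'.2) d' out'

def get_square_ordered_idxs_alt (square_side_size : Int) (square_id : Int) : List (Int × Int) :=
  let lo := square_id
  let hi := square_side_size - square_id - 1
  pvWalk lo hi (4 * (hi - lo)).toNat lo lo 0 []

-- ===== PRECONDITION & SPEC =====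
-- Pre_ excludes exactly the inputs where A's assert fails (AssertionError).
def Pre_get_square_ordered_idxs (square_side_size : Int) (square_id : Int) : Prop :=
  0 ≤ square_id ∧ square_id < PySem.Int.floordiv square_side_size 2
instance (square_side_size : Int) (square_id : Int) : Decidable (Pre_get_square_ordered_idxs square_side_size square_id) := by unfold Pre_get_square_ordered_idxs; infer_instance

def pvWitness_get_square_ordered_idxs : Int × Int := (5, 1)

def Spec_get_square_ordered_idxs (square_side_size : Int) (square_id : Int) (out : List (Int × Int)) : Prop := out = get_square_ordered_idxs_alt square_side_size square_id
instance (square_side_size : Int) (square_id : Int) (out : List (Int × Int)) : Decidable (Spec_get_square_ordered_idxs square_side_size square_id out) := by unfold Spec_get_square_ordered_idxs; infer_instance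

-- ===== CLAIM (what is proved, stated in full; the proofs are below) =====
def Claim_equal_get_square_ordered_idxs : Prop := ∀ (square_side_size : Int) (square_id : Int), Dom_get_square_ordered_idxs square_side_size square_id → Pre_get_square_ordered_idxs square_side_size square_id → Spec_get_square_ordered_idxs square_side_size square_id (get_square_ordered_idxs square_side_size square_id)

-- ===== LEMMAS AND PROOFS =====

-- straight run along the top edge (dir 0 = right)
theorem pvWalk_top (lo hi : Int) (hlt : lo < hi) :
    ∀ (n rest : Nat) (c : Int) (out : List (Int × Int)), c + n = hi → lo ≤ c →
      pvWalk lo hi (n + rest) lo c 0 out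
        = pvWalk lo hi rest lo hi 0 (out ++ (List.range n).map (fun (k : Nat) => (lo, c + (k : Int)))) := by
  intro n
  induction n with
  | zero => intro rest c out hc _; simp_all
  | succ n ih =>
    intro rest c out hc hl
    have hstep : Nat.succ n + rest = Nat.succ (n + rest) := by omega
    rw [hstep, pvWalk]
    rw [if_pos (by push_cast at hc; simp [pvDir]; omega)]

    
    rw [show lo + (pvDir 0).1 = lo from by norm_num [pvDir],
      show c + (pvDir 0).2 = c + 1 from by norm_num [pvDir]]
    rw [ih rest (c + 1) (out ++ [(lo, c)]) (by push_cast at hc ⊢; omega) (by omega)]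
    congr 1
    rw [List.range_succ_eq_map]
    simp [Function.comp, List.append_assoc]
    intro k _
    push_cast
    ring

-- straight run along the right edge (dir 1 = down)
theorem pvWalk_right (lo hi : Int) (hlt : lo < hi) :
    ∀ (n rest : Nat) (r : Int) (out : List (Int × Int)), r + n = hi → lo ≤ r →
      pvWalk lo hi (n + rest) r hi 1 out
        = pvWalk lo hi rest hi hi 1 (out ++ (List.range n).map (fun (k : Nat) => (r + (k : Int), hi))) := by
  intro n
  induction n with
  | zero => intro rest r out hr _; simp_all
  | succ n ih =>
    intro rest r out hr hl
    have hstep : Nat.succ n + rest = Nat.succ (n + rest) := by omega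
    rw [hstep, pvWalk]
    rw [if_pos (by push_cast at hr; simp [pvDir]; omega)]

    
    rw [show r + (pvDir 1).1 = r + 1 from by norm_num [pvDir],
      show hi + (pvDir 1).2 = hi from by norm_num [pvDir]]
    rw [ih rest (r + 1) (out ++ [(r, hi)]) (by push_cast at hr ⊢; omega) (by omega)]
    congr 1
    rw [List.range_succ_eq_map]
    simp [Function.comp, List.append_assoc]
    intro k _
    push_cast
    ring

-- straight run along the bottom edge (dir 2 = left)
theorem pvWalk_bottom (lo hi : Int) (hlt : lo < hi) :
    ∀ (n rest : Nat) (c : Int) (out : List (Int × Int)), c - n = lo → c ≤ hi →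
      pvWalk lo hi (n + rest) hi c 2 out
        = pvWalk lo hi rest hi lo 2 (out ++ (List.range n).map (fun (k : Nat) => (hi, c - (k : Int)))) := by
  intro n
  induction n with
  | zero => intro rest c out hc _; simp_all
  | succ n ih =>
    intro rest c out hc hl
    have hstep : Nat.succ n + rest = Nat.succ (n + rest) := by omega
    rw [hstep, pvWalk]
    rw [if_pos (by push_cast at hc; simp [pvDir]; omega)]

    
    rw [show hi + (pvDir 2).1 = hi from by norm_num [pvDir],
      show c + (pvDir 2).2 = c - 1 from by simp [pvDir]; ring]
    rw [ih rest (c - 1) (out ++ [(hi, c)]) (by push_cast at hc ⊢; omega) (by omega)]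
    congr 1
    rw [List.range_succ_eq_map]
    simp [Function.comp, List.append_assoc]
    intro k _
    push_cast
    ring

-- straight run along the left edge (dir 3 = up); last phase, exact fuel
theorem pvWalk_left (lo hi : Int) (hlt : lo < hi) :
    ∀ (n : Nat) (r : Int) (out : List (Int × Int)), lo ≤ r - n → r ≤ hi →
      pvWalk lo hi n r lo 3 out
        = out ++ (List.range n).map (fun (k : Nat) => (r - (k : Int), lo)) := by
  intro n
  induction n with
  | zero => intro r out _ _; simp [pvWalk]
  | succ n ih =>
    intro r out hr hl
    rw [pvWalk]
    rw [if_pos (by push_cast at hr; simp [pvDir]; omega)]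

    
    rw [show r + (pvDir 3).1 = r - 1 from by simp [pvDir]; ring,
      show lo + (pvDir 3).2 = lo from by norm_num [pvDir]]
    rw [ih (r - 1) (out ++ [(r, lo)]) (by push_cast at hr ⊢; omega) (by omega)]
    rw [List.range_succ_eq_map]
    simp [Function.comp, List.append_assoc]
    intro k _
    push_cast
    ring

-- corner turns
theorem pvWalk_corner_tr (lo hi : Int) (hlt : lo < hi) (rest : Nat) (out : List (Int × Int)) :
    pvWalk lo hi (Nat.succ rest) lo hi 0 out = pvWalk lo hi rest (lo + 1) hi 1 (out ++ [(lo, hi)]) := by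
  rw [pvWalk]
  rw [if_neg (by simp [pvDir]; try omega)]
  rw [show PySem.Int.mod (0 + 1) 4 = 1 from by decide]
  norm_num [pvDir]
  try ring_nf

theorem pvWalk_corner_br (lo hi : Int) (hlt : lo < hi) (rest : Nat) (out : List (Int × Int)) :
    pvWalk lo hi (Nat.succ rest) hi hi 1 out = pvWalk lo hi rest hi (hi - 1) 2 (out ++ [(hi, hi)]) := by
  rw [pvWalk]
  rw [if_neg (by simp [pvDir]; try omega)]
  rw [show PySem.Int.mod (1 + 1) 4 = 2 from by decide]
  norm_num [pvDir]
  try ring_nf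

theorem pvWalk_corner_bl (lo hi : Int) (hlt : lo < hi) (rest : Nat) (out : List (Int × Int)) :
    pvWalk lo hi (Nat.succ rest) hi lo 2 out = pvWalk lo hi rest (hi - 1) lo 3 (out ++ [(hi, lo)]) := by
  rw [pvWalk]
  rw [if_neg (by simp [pvDir]; try omega)]
  rw [show PySem.Int.mod (2 + 1) 4 = 3 from by decide]
  norm_num [pvDir]
  try ring_nf

-- ===== VERDICT (by name: the statement is the Claim_ definition above) =====
theorem get_square_ordered_idxs_spec : Claim_equal_get_square_ordered_idxs := by
  intro s id _ hpre
  obtain ⟨h0, h1⟩ := hpre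
  have h1' : id + 1 ≤ PySem.Int.floordiv s 2 := by omega
  have hs : (id + 1) * 2 ≤ s := (PySem.Int.le_floordiv_iff_mul_le (by omega)).mp h1'
  set lo := id with hlo
  set hi := s - id - 1 with hhi
  have hlt : lo < hi := by omega
  set m : Nat := (hi - lo).toNat with hm
  have hmc : (m : Int) = hi - lo := by omega
  have hm1 : 1 ≤ m := by omega
  unfold Spec_get_square_ordered_idxs get_square_ordered_idxs get_square_ordered_idxs_alt
  -- B side: run the four phases
  have hfuel : (4 * (s - id - 1 - id)).toNat
      = m + (Nat.succ ((m - 1) + Nat.succ ((m - 1) + Nat.succ (m - 1)))) := by omega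
  simp only [← hhi]
  rw [show s - id - 1 - lo = hi - lo from rfl] at *
  rw [hfuel]
  rw [pvWalk_top lo hi hlt m _ lo [] (by omega) (by omega)]
  rw [pvWalk_corner_tr lo hi hlt]
  rw [pvWalk_right lo hi hlt (m - 1) _ (lo + 1) _ (by omega) (by omega)]
  rw [pvWalk_corner_br lo hi hlt]
  rw [pvWalk_bottom lo hi hlt (m - 1) _ (hi - 1) _ (by omega) (by omega)]
  rw [pvWalk_corner_bl lo hi hlt]
  rw [pvWalk_left lo hi hlt (m - 1) (hi - 1) _ (by omega) (by omega)]
  -- A side: the four loops as maps over ranges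
  simp only [PySem.List.foldl_append_singleton_eq_map, List.nil_append,
    PySem.List.pyRange_one, PySem.List.pyRange_neg_one, List.map_map]
  -- segment lengths
  have e1 : (s - id - lo).toNat = m + 1 := by omega
  have e2 : (s - (id + 1) - (id + 1)).toNat = m - 1 := by omega
  have e3 : (s - (id + 1) - id).toNat = m := by omega
  rw [show s - (id + 1) = hi from by omega] at *
  rw [e1, e2, e3]
  -- match the segments
  rw [show m = (m - 1) + 1 from by omega, List.range_succ, List.range_succ_eq_map]
  simp only [List.map_append, List.map_cons, List.map_map, List.append_assoc,
    List.map_nil, Function.comp]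
  congr 1
  rw [show (m - 1 + 1) = m from by omega, show lo + (m : Int) = hi from by omega]
  simp only [Nat.cast_zero, sub_zero, Function.comp_def, Nat.succ_eq_add_one,
    List.cons_append]
  push_cast
  ring_nf
  simp
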